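-- pv_equiv track=rewrite | github.com/Kabiso17/ocp-automation-ui | backend/imageset.py | _pick_best_channel
-- ===== SOURCE A (Python) =====
-- from typing import List, Optional
--
-- def _pick_best_channel(channels: List[dict], default_channel: str) -> Optional[dict]:
--     """
--     從 package 的頻道清單中挑選最佳頻道：
--     1. 優先使用 default_channel（與 catalog 清單的 default_channel 相符）
--     2. 其次找名稱含 'stable' 的頻道
--     3. 最後 fallback 到第一個頻道
--     回傳 {channel, head_version, head_bundle} 或 None
--     """
--     if not channels:
--         return None
--     # 完全符合 default_channel
--     for ch in channels:
--         if ch.get("channel") == default_channel: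
--             return ch
--     # 包含 stable
--     for ch in channels:
--         if "stable" in ch.get("channel", ""):
--             return ch
--     return channels[0]
-- ===== SOURCE B (Python) =====
-- def _pick_best_channel(channels, default_channel):
--     """Single pass keeping the first exact and first 'stable' match (A does two passes)."""
--     if not channels:
--         return None
--     first_exact = None
--     first_stable = None
--     for ch in channels:
--         if first_exact is None and ch.get("channel") == default_channel:
--             first_exact = ch
--         if first_stable is None and "stable" in ch.get("channel", ""):
--             first_stable = ch
--     if first_exact is not None:
--         return first_exact
--     if first_stable is not None:
--         return first_stable
--     return channels[0]
-- ===== Notes on version B (the rewrite author's own statement) =====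
-- stated objective: alternative
-- what changed: Replaced A's two sequential scans (exact match, then 'stable' substring) by one loop that records the first exact and first 'stable' match in two variables and picks among them afterwards.
import Mathlib
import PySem

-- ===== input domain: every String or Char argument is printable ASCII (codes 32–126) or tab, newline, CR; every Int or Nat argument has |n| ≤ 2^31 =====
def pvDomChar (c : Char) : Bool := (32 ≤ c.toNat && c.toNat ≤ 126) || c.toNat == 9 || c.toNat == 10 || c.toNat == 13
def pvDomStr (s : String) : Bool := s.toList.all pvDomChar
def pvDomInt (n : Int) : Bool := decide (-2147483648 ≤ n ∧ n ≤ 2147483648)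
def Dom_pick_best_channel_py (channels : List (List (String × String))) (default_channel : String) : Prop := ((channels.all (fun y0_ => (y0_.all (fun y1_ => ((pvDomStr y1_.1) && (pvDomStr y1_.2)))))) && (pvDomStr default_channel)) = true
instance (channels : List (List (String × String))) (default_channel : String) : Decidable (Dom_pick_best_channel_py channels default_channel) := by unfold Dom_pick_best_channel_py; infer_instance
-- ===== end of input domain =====

-- B replaces A's two sequential scans with one loop that records the first exact and the first 'stable' match (alternative decomposition, same cost).


-- ===== PORT A =====
-- first loop of A: return the first ch with ch.get("channel") == default_channel
def pbcA_exact (channels : List (List (String × String))) (default_channel : String) : Option (List (String × String)) :=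
  match channels with
  | [] => none
  | ch :: rest =>
      if (PySem.Dict.mk ch).get? "channel" = some default_channel then some ch
      else pbcA_exact rest default_channel

-- second loop of A: return the first ch with "stable" in ch.get("channel", "")
def pbcA_stable (channels : List (List (String × String))) : Option (List (String × String)) :=
  match channels with
  | [] => none
  | ch :: rest =>
      if PySem.Str.isIn "stable" ((PySem.Dict.mk ch).getD "channel" "") then some ch
      else pbcA_stable rest

def pick_best_channel_py (channels : List (List (String × String))) (default_channel : String) : Option (List (String × String)) :=
  if channels = [] then none
  else
    match pbcA_exact channels default_channel with
    | some ch => some ch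
    | none =>
      match pbcA_stable channels with
      | some ch => some ch
      | none => PySem.List.pyGet? channels 0

-- ===== PORT B =====
-- B's single loop body: update (first_exact, first_stable) with ch
def pbcB_step (default_channel : String)
    (acc : Option (List (String × String)) × Option (List (String × String)))
    (ch : List (String × String)) :
    Option (List (String × String)) × Option (List (String × String)) :=
  ( if acc.1 = none ∧ (PySem.Dict.mk ch).get? "channel" = some default_channel then some ch else acc.1,
    if acc.2 = none ∧ PySem.Str.isIn "stable" ((PySem.Dict.mk ch).getD "channel" "") then some ch else acc.2 )

def pick_best_channel_py_alt (channels : List (List (String × String))) (default_channel : String) : Option (List (String × String)) :=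
  if channels = [] then none
  else
    let res := channels.foldl (pbcB_step default_channel) (none, none)
    match res.1 with
    | some ch => some ch
    | none =>
      match res.2 with
      | some ch => some ch
      | none => PySem.List.pyGet? channels 0

-- ===== PRECONDITION & SPEC =====
def Spec_pick_best_channel_py (channels : List (List (String × String))) (default_channel : String) (out : Option (List (String × String))) : Prop := out = pick_best_channel_py_alt channels default_channel
instance (channels : List (List (String × String))) (default_channel : String) (out : Option (List (String × String))) : Decidable (Spec_pick_best_channel_py channels default_channel out) := by unfold Spec_pick_best_channel_py; infer_instance

-- ===== CLAIM (what is proved, stated in full; the proofs are below) =====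
def Claim_equal_pick_best_channel_py : Prop := ∀ (channels : List (List (String × String))) (default_channel : String), Dom_pick_best_channel_py channels default_channel → Spec_pick_best_channel_py channels default_channel (pick_best_channel_py channels default_channel)

-- ===== LEMMAS AND PROOFS =====
-- the fold's invariant: each component keeps its first hit, pending ones come from the A-side scans
theorem pbcB_fold_eq (l : List (List (String × String))) (d : String)
    (e s : Option (List (String × String))) :
    l.foldl (pbcB_step d) (e, s)
      = (e.orElse (fun _ => pbcA_exact l d), s.orElse (fun _ => pbcA_stable l)) := by
  induction l generalizing e s with
  | nil => cases e <;> cases s <;> rfl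
  | cons ch rest ih =>
      simp only [List.foldl_cons, pbcB_step, pbcA_exact, pbcA_stable]
      cases e <;> cases s <;>
        · simp only [Option.orElse]
          split_ifs <;> simp_all [Option.orElse]

-- ===== VERDICT (by name: the statement is the Claim_ definition above) =====
theorem pick_best_channel_py_spec : Claim_equal_pick_best_channel_py := by
  intro channels d _
  unfold Spec_pick_best_channel_py pick_best_channel_py pick_best_channel_py_alt
  by_cases h : channels = []
  · simp [h]
  · simp only [h, ite_false, pbcB_fold_eq, Option.orElse]
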